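-- pv_equiv track=rewrite | github.com/ryancblocker/cs320 | assignments/repeating-patterns/main.py | repeats
-- ===== SOURCE A (Python) =====
-- def repeats(list):
--     if list is None or len(list) < 2:
--         return None
--     for pattern_length in range(1, len(list) // 2 + 1):
--         if len(list) % pattern_length == 0:
--             pattern = list[:pattern_length]
--             if pattern * (len(list) // pattern_length) == list:
--                 return pattern
--     return None
-- ===== SOURCE B (Python) =====
-- def repeats(list):
--     if list is None or len(list) < 2:
--         return None
--     n = len(list)
--     divs = []
--     i = 1
--     while i * i <= n:
--         if n % i == 0:
--             divs.append(i)
--             if i < n // i: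
--                 divs.append(n // i)
--         i += 1
--     for p in sorted(divs):
--         if p > n // 2:
--             break
--         if list == list[:p] * (n // p):
--             return list[:p]
--     return None
-- ===== Notes on version B (the rewrite author's own statement) =====
-- stated objective: alternative
-- what changed: Instead of scanning every length 1..n//2 and testing divisibility, B enumerates the divisors of n in O(sqrt(n)) paired trial divisions, sorts them, and scans that short sorted list (breaking past n//2) for the first length whose block repetition rebuilds the list.
import Mathlib
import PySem

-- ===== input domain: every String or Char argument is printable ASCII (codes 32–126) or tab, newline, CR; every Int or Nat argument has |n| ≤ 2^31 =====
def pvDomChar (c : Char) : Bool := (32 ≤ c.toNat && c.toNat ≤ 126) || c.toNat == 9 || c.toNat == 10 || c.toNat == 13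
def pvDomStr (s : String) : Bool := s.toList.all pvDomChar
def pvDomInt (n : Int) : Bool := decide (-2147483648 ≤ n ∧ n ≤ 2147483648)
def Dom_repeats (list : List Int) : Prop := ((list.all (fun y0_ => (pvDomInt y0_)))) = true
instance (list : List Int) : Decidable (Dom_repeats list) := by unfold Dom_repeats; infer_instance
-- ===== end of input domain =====

-- B replaces A's scan of every candidate length with O(sqrt n) divisor-pair
-- enumeration, a sort, and a scan of that short sorted divisor list (alternative).

-- ===== PORT A =====
-- the for-loop over range(1, len//2 + 1): first p with len % p == 0 and pattern*(len//p) == list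
def repeatsA_go (l : List Int) (n : Nat) : List Nat → Option (List Int)
  | [] => none
  | p :: ps =>
    if n % p = 0 then
      let pattern := l.take p
      if (List.replicate (n / p) pattern).flatten = l then some pattern
      else repeatsA_go l n ps
    else repeatsA_go l n ps

def repeats (list : List Int) : Option (List Int) :=
  if list.length < 2 then none
  else repeatsA_go list list.length (List.range' 1 (list.length / 2))

-- ===== PORT B =====
-- while i*i <= n: collect divisor pairs (i, n//i), deduplicated
def divsFrom (n : Nat) : Nat → List Nat
  | i =>
    if _h : i * i ≤ n then
      (if n % i = 0 then (if i < n / i then [i, n / i] else [i]) else []) ++ divsFrom n (i + 1)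
    else []
  termination_by i => n + 1 - i
  decreasing_by
    have : i ≤ n := by nlinarith
    omega

-- for p in sorted(divs): break past n//2, else test the block repetition
def repeatsB_go (l : List Int) (n : Nat) : List Nat → Option (List Int)
  | [] => none
  | p :: ps =>
    if n / 2 < p then none
    else if l = (List.replicate (n / p) (l.take p)).flatten then some (l.take p)
    else repeatsB_go l n ps

def repeats_alt (list : List Int) : Option (List Int) :=
  if list.length < 2 then none
  else
    repeatsB_go list list.length
      (PySem.List.sorted (divsFrom list.length 1) (fun x => x) false)

-- ===== PRECONDITION & SPEC =====
def Spec_repeats (list : List Int) (out : Option (List Int)) : Prop := out = repeats_alt list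
instance (list : List Int) (out : Option (List Int)) : Decidable (Spec_repeats list out) := by unfold Spec_repeats; infer_instance

-- ===== CLAIM =====
def Claim_equal_repeats : Prop := ∀ (list : List Int), Dom_repeats list → Spec_repeats list (repeats list)

-- ===== LEMMAS AND PROOFS =====

-- the common success test, as a Bool predicate on the candidate length
def chk (l : List Int) (n p : Nat) : Bool := decide ((List.replicate (n / p) (l.take p)).flatten = l)

theorem repeatsA_go_eq_find (l : List Int) (n : Nat) (ps : List Nat) :
    repeatsA_go l n ps
      = ((ps.filter (fun p => n % p == 0)).find? (fun p => chk l n p)).map (fun p => l.take p) := by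
  induction ps with
  | nil => simp [repeatsA_go]
  | cons p ps ih =>
    by_cases hd : n % p = 0
    · by_cases hc : (List.replicate (n / p) (l.take p)).flatten = l
      · have hchk : chk l n p = true := decide_eq_true hc
        simp only [repeatsA_go, if_pos hd, if_pos hc]
        rw [List.filter_cons, if_pos (by simpa using hd), List.find?_cons_of_pos hchk]
        rfl
      · have hchk : chk l n p = false := decide_eq_false hc
        simp only [repeatsA_go, if_pos hd, if_neg hc]
        rw [List.filter_cons, if_pos (by simpa using hd),
          List.find?_cons_of_neg (by simp [hchk])]
        exact ih
    · simp only [repeatsA_go, if_neg hd]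
      rw [List.filter_cons, if_neg (by simpa using hd)]
      exact ih

theorem repeatsB_go_eq_find (l : List Int) (n : Nat) (ps : List Nat) :
    repeatsB_go l n ps
      = ((ps.takeWhile (fun p => p ≤ n / 2)).find? (fun p => chk l n p)).map (fun p => l.take p) := by
  induction ps with
  | nil => simp [repeatsB_go]
  | cons p ps ih =>
    by_cases hb : n / 2 < p
    · simp only [repeatsB_go, if_pos hb]
      rw [List.takeWhile_cons, if_neg (by simpa using Nat.not_le.mpr hb)]
      rfl
    · have hle : p ≤ n / 2 := Nat.not_lt.mp hb
      by_cases hc : l = (List.replicate (n / p) (l.take p)).flatten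
      · have hchk : chk l n p = true := decide_eq_true hc.symm
        simp only [repeatsB_go, if_neg hb, if_pos hc]
        rw [List.takeWhile_cons, if_pos (by simpa using hle), List.find?_cons_of_pos hchk]
        rfl
      · have hchk : chk l n p = false := decide_eq_false (fun h => hc h.symm)
        simp only [repeatsB_go, if_neg hb, if_neg hc]
        rw [List.takeWhile_cons, if_pos (by simpa using hle),
          List.find?_cons_of_neg (by simp [hchk])]
        exact ih

-- membership characterisation of the divisor-pair enumeration
theorem mem_divsFrom (n : Nat) (i d : Nat) :
    d ∈ divsFrom n i ↔
      ∃ j, i ≤ j ∧ j * j ≤ n ∧ n % j = 0 ∧ (d = j ∨ (j < n / j ∧ d = n / j)) := by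
  induction i using divsFrom.induct n with
  | case1 i _i h ih =>
    rw [divsFrom, dif_pos h, List.mem_append, ih]
    constructor
    · rintro (hd | ⟨j, hj1, hj2, hj3, hj4⟩)
      · by_cases hm : n % i = 0
        · refine ⟨i, le_refl _, h, hm, ?_⟩
          by_cases hlt : i < n / i
          · simp [hm, hlt] at hd
            rcases hd with hd | hd
            · exact Or.inl hd
            · exact Or.inr ⟨hlt, hd⟩
          · simp [hm, hlt] at hd
            exact Or.inl hd
        · simp [hm] at hd
      · exact ⟨j, by omega, hj2, hj3, hj4⟩
    · rintro ⟨j, hj1, hj2, hj3, hj4⟩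
      by_cases hji : j = i
      · subst hji
        left
        rcases hj4 with hd | ⟨hlt, hd⟩
        · subst hd; by_cases hlt : d < n / d <;> simp [hj3, hlt]
        · subst hd; simp [hj3, hlt]
      · right; exact ⟨j, by omega, hj2, hj3, hj4⟩
  | case2 i _i h =>
    rw [divsFrom, dif_neg h]
    simp only [List.not_mem_nil, false_iff]
    rintro ⟨j, hj1, hj2, hj3, hj4⟩
    have hsq : ¬ i * i ≤ n := h
    have : i * i ≤ j * j := Nat.mul_le_mul hj1 hj1
    omega

theorem mem_divs_iff (n : Nat) (hn : 1 ≤ n) (d : Nat) :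
    d ∈ divsFrom n 1 ↔ (1 ≤ d ∧ d ≤ n ∧ n % d = 0) := by
  rw [mem_divsFrom]
  constructor
  · rintro ⟨j, hj1, hj2, hj3, hj4⟩
    have hjd : j ∣ n := Nat.dvd_of_mod_eq_zero hj3
    rcases hj4 with hd | ⟨hlt, hd⟩
    · subst hd
      exact ⟨hj1, Nat.le_of_dvd hn hjd, hj3⟩
    · subst hd
      have hq : (n / j) ∣ n := Nat.div_dvd_of_dvd hjd
      exact ⟨by omega, Nat.le_of_dvd hn hq, Nat.mod_eq_zero_of_dvd hq⟩
  · rintro ⟨h1, h2, h3⟩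
    have hdvd : d ∣ n := Nat.dvd_of_mod_eq_zero h3
    have hmul : d * (n / d) = n := Nat.mul_div_cancel' hdvd
    by_cases hsq : d * d ≤ n
    · exact ⟨d, h1, hsq, h3, Or.inl rfl⟩
    · -- large divisor: produced as n / j with j = n / d
      have hq1 : 1 ≤ n / d := (Nat.one_le_div_iff (by omega)).mpr h2
      have hjlt : n / d < d := by nlinarith
      have hqd : (n / d) ∣ n := Nat.div_dvd_of_dvd hdvd
      refine ⟨n / d, hq1, by nlinarith, Nat.mod_eq_zero_of_dvd hqd, Or.inr ⟨?_, ?_⟩⟩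
      · rw [Nat.div_div_self hdvd (by omega)]; exact hjlt
      · rw [Nat.div_div_self hdvd (by omega)]

theorem nodup_divsFrom (n : Nat) (i : Nat) : (divsFrom n i).Nodup := by
  induction i using divsFrom.induct n with
  | case1 i _i h ih =>
    rw [divsFrom, dif_pos h]
    have hgt : ∀ d ∈ divsFrom n (i + 1), i < d ∧ (n % i = 0 → d ≠ n / i) := by
      intro d hd
      rw [mem_divsFrom] at hd
      obtain ⟨j, hj1, hj2, hj3, hj4⟩ := hd
      have hjd : j ∣ n := Nat.dvd_of_mod_eq_zero hj3
      have hjn : j * (n / j) = n := Nat.mul_div_cancel' hjd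
      constructor
      · rcases hj4 with hd | ⟨hlt, hd⟩ <;> omega
      · intro hmi hdi
        have hidvd : i ∣ n := Nat.dvd_of_mod_eq_zero hmi
        have hin : i * (n / i) = n := Nat.mul_div_cancel' hidvd
        rcases hj4 with hd | ⟨hlt, hd⟩
        · subst hd; nlinarith
        · subst hd
          rw [hdi] at hjn
          nlinarith
    by_cases hm : n % i = 0
    · by_cases hlt : i < n / i
      · rw [if_pos hm, if_pos hlt]
        apply List.Nodup.append
        · simp; omega
        · exact ih
        · intro a ha hb
          simp at ha
          rcases ha with rfl | rfl
          · exact absurd (hgt _ hb).1 (by omega)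
          · exact (hgt _ hb).2 hm rfl
      · rw [if_pos hm, if_neg hlt]
        apply List.Nodup.append (by simp) ih
        intro a ha hb
        simp at ha
        rcases ha with rfl
        exact absurd (hgt _ hb).1 (by omega)
    · rw [if_neg hm]
      simpa using ih
  | case2 i _i h =>
    rw [divsFrom, dif_neg h]
    simp

-- the sorted divisor list is exactly the divisors of n listed in increasing order
theorem sorted_divs_eq (n : Nat) (hn : 1 ≤ n) :
    PySem.List.sorted (divsFrom n 1) (fun x => x) false
      = (List.range' 1 n).filter (fun p => n % p == 0) := by
  apply PySem.List.sorted_eq_of_perm_of_pairwise_lt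
  · rw [List.perm_ext_iff_of_nodup ((List.nodup_range' ..).filter _) (nodup_divsFrom n 1)]
    intro d
    rw [List.mem_filter, List.mem_range', mem_divs_iff n hn]
    constructor
    · rintro ⟨⟨k, hk, hkd⟩, h2⟩
      refine ⟨by omega, by omega, by simpa using h2⟩
    · rintro ⟨h1, h2, h3⟩
      exact ⟨⟨d - 1, by omega, by omega⟩, by simpa using h3⟩
  · exact List.Pairwise.filter _ (List.pairwise_lt_range' ..)

-- range' 1 n cut at n/2
theorem filter_le_half (n : Nat) :
    (List.range' 1 n).filter (fun p => p ≤ n / 2) = List.range' 1 (n / 2) := by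
  have hsplit := @List.range'_append 1 (n / 2) (n - n / 2) 1
  rw [show n / 2 + (n - n / 2) = n by omega] at hsplit
  rw [← hsplit, List.filter_append]
  have h1 : (List.range' 1 (n / 2) 1).filter (fun p => p ≤ n / 2) = List.range' 1 (n / 2) 1 := by
    apply List.filter_eq_self.mpr
    intro a ha
    rw [List.mem_range'] at ha
    obtain ⟨k, hk, hak⟩ := ha
    simp only [decide_eq_true_eq]
    omega
  have h2 : (List.range' (1 + 1 * (n / 2)) (n - n / 2) 1).filter (fun p => p ≤ n / 2) = [] := by
    apply List.filter_eq_nil_iff.mpr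
    intro a ha
    rw [List.mem_range'] at ha
    obtain ⟨k, hk, hak⟩ := ha
    simp only [decide_eq_true_eq]
    omega
  rw [h1, h2, List.append_nil]

-- takeWhile on the increasing divisor list = filter, then cut at n/2
theorem takeWhile_sorted_divs (n : Nat) :
    ((List.range' 1 n).filter (fun p => n % p == 0)).takeWhile (fun p => p ≤ n / 2)
      = ((List.range' 1 (n / 2)).filter (fun p => n % p == 0)) := by
  have hpair : ((List.range' 1 n).filter (fun p => n % p == 0)).Pairwise (· < ·) :=
    List.Pairwise.filter _ (List.pairwise_lt_range' ..)
  have htf : ∀ (l : List Nat), l.Pairwise (· < ·) →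
      l.takeWhile (fun p => p ≤ n / 2) = l.filter (fun p => p ≤ n / 2) := by
    intro l hl
    induction l with
    | nil => rfl
    | cons a l ih =>
      rw [List.pairwise_cons] at hl
      by_cases ha : a ≤ n / 2
      · simp [ha, ih hl.2]
      · simp only [List.takeWhile_cons, List.filter_cons, decide_eq_false ha]
        simp only [Bool.false_eq_true, if_neg, not_false_iff]
        symm
        apply List.filter_eq_nil_iff.mpr
        intro b hb
        have := hl.1 b hb
        simp only [decide_eq_true_eq]
        omega
  rw [htf _ hpair, List.filter_comm, filter_le_half]

-- ===== VERDICT =====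
theorem repeats_spec : Claim_equal_repeats := by
  intro list _
  unfold Spec_repeats repeats repeats_alt
  by_cases hlen : list.length < 2
  · simp [hlen]
  · simp only [hlen, if_neg, not_false_iff]
    have hn : 1 ≤ list.length := by omega
    rw [repeatsA_go_eq_find, repeatsB_go_eq_find, sorted_divs_eq _ hn,
      takeWhile_sorted_divs]
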